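-- pv_equiv track=rewrite | github.com/ellismckenzielee/codewars-python | ticker.py | ticker
-- ===== SOURCE A (Python) =====
-- def ticker(text, width, tick):
--     text = ' '*width + text
--     text = list(text)
--     output_text = ''
--     for num in range(tick, tick+width):
--         index = num % len(text)
--         output_text += text[index]
--     return output_text
-- ===== SOURCE B (Python) =====
-- def ticker(text, width, tick):
--     if width <= 0:
--         return ''
--     buf = ' ' * width + text
--     n = len(buf)
--     start = tick % n
--     stop = start + width
--     if stop <= n:
--         return buf[start:stop]
--     return buf[start:] + buf[:stop - n]
-- ===== Notes on version B (the rewrite author's own statement) =====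
-- stated objective: faster
-- what changed: Replaces the per-character modular-index loop (with repeated string concatenation) by computing start = tick % len(buffer) once and returning one slice, or two slices for the single possible wraparound.
import Mathlib
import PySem

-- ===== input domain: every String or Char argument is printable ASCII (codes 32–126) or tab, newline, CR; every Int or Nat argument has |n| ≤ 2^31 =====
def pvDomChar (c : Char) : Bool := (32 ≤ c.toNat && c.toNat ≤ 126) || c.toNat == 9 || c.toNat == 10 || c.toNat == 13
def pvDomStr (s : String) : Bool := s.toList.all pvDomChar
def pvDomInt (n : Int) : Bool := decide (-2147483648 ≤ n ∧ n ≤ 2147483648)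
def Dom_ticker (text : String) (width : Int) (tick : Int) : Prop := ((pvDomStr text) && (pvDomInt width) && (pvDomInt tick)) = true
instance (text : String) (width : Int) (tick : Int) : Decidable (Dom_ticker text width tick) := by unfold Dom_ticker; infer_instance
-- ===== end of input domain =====

-- B replaces A's per-character modular-index loop with slice arithmetic (objective: faster; measured).

-- ===== PORT A =====
-- text = ' '*width + text  (negative repetition gives '', matched by toNat);
-- the loop appends text[num % len(text)] for num in range(tick, tick+width).
-- pyGetD's default is unreachable: whenever the loop runs, width > 0 so the list is nonempty
-- and num % len is in range.
def ticker (text : String) (width : Int) (tick : Int) : String :=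
  let t : List Char := List.replicate width.toNat ' ' ++ text.toList
  let out : List Char := (PySem.List.pyRange tick (tick + width) 1).foldl
    (fun acc num => acc ++ [PySem.List.pyGetD t (PySem.Int.mod num (t.length : Int)) ' ']) []
  String.ofList out

-- ===== PORT B =====
def ticker_alt (text : String) (width : Int) (tick : Int) : String :=
  if width ≤ 0 then "" else
  let buf : List Char := List.replicate width.toNat ' ' ++ text.toList
  let n : Int := buf.length
  let start : Int := PySem.Int.mod tick n
  let stop : Int := start + width
  if stop ≤ n then String.ofList (PySem.List.slice buf (some start) (some stop))
  else String.ofList (PySem.List.slice buf (some start) none ++ PySem.List.slice buf none (some (stop - n)))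

-- ===== PRECONDITION & SPEC =====
def Spec_ticker (text : String) (width : Int) (tick : Int) (out : String) : Prop := out = ticker_alt text width tick
instance (text : String) (width : Int) (tick : Int) (out : String) : Decidable (Spec_ticker text width tick out) := by unfold Spec_ticker; infer_instance

-- ===== CLAIM (what is proved, stated in full; the proofs are below) =====
def Claim_equal_ticker : Prop := ∀ (text : String) (width : Int) (tick : Int), Dom_ticker text width tick → Spec_ticker text width tick (ticker text width tick)

-- ===== LEMMAS AND PROOFS =====

-- A's loop is a map over the range
lemma ticker_loop_eq_map (buf : List Char) (tick width : Int) :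
    (PySem.List.pyRange tick (tick + width) 1).foldl
      (fun acc num => acc ++ [PySem.List.pyGetD buf (PySem.Int.mod num (buf.length : Int)) ' ']) []
    = (List.range width.toNat).map
        (fun (k : Nat) => PySem.List.pyGetD buf (PySem.Int.mod (tick + (k : Int)) (buf.length : Int)) ' ') := by
  rw [PySem.List.foldl_append_singleton_eq_map, PySem.List.pyRange_one, List.map_map,
      add_sub_cancel_left]
  rfl

-- the wrapped modulus, for a positive divisor
lemma emod_window (s k n : Int) (hs0 : 0 ≤ s) (hsn : s < n) (hk : 0 ≤ k) (hkn : k < n) :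
    (s + k) % n = if s + k < n then s + k else s + k - n := by
  split_ifs with h
  · exact Int.emod_eq_of_lt (by omega) h
  · calc (s + k) % n = ((s + k - n) + n * 1) % n := by ring_nf
      _ = (s + k - n) % n := Int.add_mul_emod_self_left _ _ _
      _ = s + k - n := Int.emod_eq_of_lt (by omega) (by omega)

-- main window equality on char lists
lemma window_eq (buf : List Char) (tick width : Int) (hw : 0 < width)
    (hwn : width.toNat ≤ buf.length) :
    (List.range width.toNat).map
        (fun (k : Nat) => PySem.List.pyGetD buf (PySem.Int.mod (tick + (k : Int)) (buf.length : Int)) ' ')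
    = (if PySem.Int.mod tick (buf.length : Int) + width ≤ (buf.length : Int) then
        PySem.List.slice buf (some (PySem.Int.mod tick (buf.length : Int)))
          (some (PySem.Int.mod tick (buf.length : Int) + width))
      else
        PySem.List.slice buf (some (PySem.Int.mod tick (buf.length : Int))) none ++
          PySem.List.slice buf none (some (PySem.Int.mod tick (buf.length : Int) + width - buf.length))) := by
  have hN : 0 < buf.length := by omega
  have hnpos : (0 : Int) < (buf.length : Int) := by exact_mod_cast hN
  set n : Int := (buf.length : Int) with hn
  set s : Int := PySem.Int.mod tick n with hsdef
  have hmod : PySem.Int.mod tick n = tick % n := PySem.Int.mod_eq_emod_of_pos hnpos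
  have hs0 : 0 ≤ s := by rw [hsdef, hmod]; exact Int.emod_nonneg _ (by omega)
  have hsn : s < n := by rw [hsdef, hmod]; exact Int.emod_lt_of_pos _ hnpos
  have hidx : ∀ k : ℕ, k < width.toNat →
      PySem.Int.mod (tick + (k : Int)) n = if s + k < n then s + k else s + k - n := by
    intro k hk
    have hkn : (k : Int) < n := by rw [hn]; exact_mod_cast (by omega : k < buf.length)
    have key : (tick + (k : Int)) % n = (s + (k : Int)) % n := by
      conv_lhs => rw [← Int.emod_add_mul_ediv tick n]
      rw [show tick % n + n * (tick / n) + (k : Int) = (tick % n + (k : Int)) + n * (tick / n) by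
            ring,
          Int.add_mul_emod_self_left, hsdef, hmod]
    rw [PySem.Int.mod_eq_emod_of_pos hnpos, key]
    exact emod_window s k n hs0 hsn (by positivity) hkn
  split_ifs with hcase
  · -- no wrap: one slice
    rw [PySem.List.slice_toNat buf hs0 (by omega)]
    apply List.ext_getElem
    · simp; omega
    · intro i h1 h2
      simp only [List.getElem_map, List.getElem_range, List.getElem_take, List.getElem_drop]
      have hi : i < width.toNat := by simpa using h1
      rw [hidx i hi, if_pos (by omega)]
      rw [PySem.List.pyGetD_eq_getElem _ _ (by omega) (by omega)]
      congr 1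
      omega
  · -- wrap: two slices
    rw [PySem.List.slice_from buf hs0, PySem.List.slice_to buf (by omega)]
    apply List.ext_getElem
    · simp; omega
    · intro i h1 h2
      simp only [List.getElem_map, List.getElem_range]
      have hi : i < width.toNat := by simpa using h1
      rw [hidx i hi]
      by_cases hlt : s + i < n
      · rw [if_pos hlt, PySem.List.pyGetD_eq_getElem _ _ (by omega) (by omega)]
        rw [List.getElem_append_left (by simp; omega)]
        simp only [List.getElem_drop]
        congr 1
        omega
      · rw [if_neg hlt, PySem.List.pyGetD_eq_getElem _ _ (by omega) (by omega)]
        rw [List.getElem_append_right (by simp; omega)]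
        simp only [List.getElem_take]
        congr 1
        simp
        omega

-- ===== VERDICT (by name: the statement is the Claim_ definition above) =====
theorem ticker_spec : Claim_equal_ticker := by
  intro text width tick _
  unfold Spec_ticker ticker ticker_alt
  by_cases hw : width ≤ 0
  · rw [if_pos hw]
    rw [PySem.List.pyRange_one_eq_nil (by omega)]
    rfl
  · rw [if_neg hw]
    simp only []
    rw [ticker_loop_eq_map, window_eq _ _ _ (by omega) (by simp)]
    split_ifs <;> rfl
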